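-- pv_equiv track=rewrite | github.com/elastic/LogstashUI | LogstashAgent/src/logstashagent/ls_keystore_utils/utils.py | deobfuscate
-- ===== SOURCE A (Python) =====
-- def ascii_bytes_to_chars(bytes_data: bytes) -> str:
--     """Converts bytes from ascii encoded text to a string.
--
--     Args:
--         bytes_data (bytes): The bytes data to convert.
--
--     Returns:
--         str: The string representation.
--
--     Example:
--         >>> ascii_bytes_to_chars(b'hello')
--         'hello'
--     """
--     return "".join(chr(b) for b in bytes_data)
--
-- def ascii_chars_to_bytes(chars: str) -> bytes:
--     """Converts characters from ascii encoded text to bytes.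
--
--     Args:
--         chars (str): The string to convert.
--
--     Returns:
--         bytes: The bytes representation.
--
--     Example:
--         >>> ascii_chars_to_bytes('hello')
--         b'hello'
--     """
--     return bytes(ord(c) for c in chars)
--
-- def deobfuscate(obfuscated: str) -> str:
--     """De-obfuscates a string
--
--     This is only called when the password is needed in plain text form, such as when
--     calling the keystore binary, and the password is longer than
--     settings.PASSWORD_OBFUSCATED_LENGTH), because Logstash assumes a password longer
--     than that must be obfuscated.
--
--     Args:
--         obfuscated (str): The obfuscated string.
--
--     Returns:
--         str: The de-obfuscated string.
--
--     Raises: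
--         ValueError: If the obfuscated data length is invalid.
--
--     Example:
--         >>> deobfuscate(obfuscate("abc123xyz"))
--         'abc123xyz'
--     """
--     bytes_data = ascii_chars_to_bytes(obfuscated)
--     if len(bytes_data) % 2 != 0:
--         raise ValueError("Invalid obfuscated data length")
--     length = len(bytes_data)
--     half = length // 2
--     xor_part = bytes_data[:half]
--     random_part = bytes_data[half:]
--     deobfuscated = bytearray(half)
--     for i in range(half):
--         deobfuscated[i] = xor_part[i] ^ random_part[i]
--     return ascii_bytes_to_chars(deobfuscated)
-- ===== SOURCE B (Python) =====
-- def ascii_bytes_to_chars(bytes_data: bytes) -> str: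
--     return "".join(chr(b) for b in bytes_data)
--
--
-- def ascii_chars_to_bytes(chars: str) -> bytes:
--     return bytes(ord(c) for c in chars)
--
--
-- def deobfuscate(obfuscated: str) -> str:
--     bytes_data = ascii_chars_to_bytes(obfuscated)
--     if len(bytes_data) % 2 != 0:
--         raise ValueError("Invalid obfuscated data length")
--     half = len(bytes_data) // 2
--     x = int.from_bytes(bytes_data[:half], 'big') ^ int.from_bytes(bytes_data[half:], 'big')
--     return ascii_bytes_to_chars(x.to_bytes(half, 'big'))
-- ===== Notes on version B (the rewrite author's own statement) =====
-- stated objective: alternative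
-- what changed: Replaced the per-index XOR loop over a preallocated bytearray by whole-halves big-integer arithmetic: the two halves are read as big-endian integers, XORed once, and written back with a fixed-width to_bytes.
import Mathlib
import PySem

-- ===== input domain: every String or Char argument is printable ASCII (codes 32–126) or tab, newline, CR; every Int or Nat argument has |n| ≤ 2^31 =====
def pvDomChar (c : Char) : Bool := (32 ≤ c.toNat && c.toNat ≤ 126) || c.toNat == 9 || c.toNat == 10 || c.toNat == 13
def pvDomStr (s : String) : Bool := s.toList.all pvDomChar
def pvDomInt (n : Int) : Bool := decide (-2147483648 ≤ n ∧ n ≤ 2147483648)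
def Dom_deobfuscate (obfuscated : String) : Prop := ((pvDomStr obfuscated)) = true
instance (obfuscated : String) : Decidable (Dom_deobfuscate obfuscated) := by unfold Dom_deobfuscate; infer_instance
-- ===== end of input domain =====

-- B replaces A's per-index XOR loop by whole-halves big-integer XOR (alternative algorithm, same cost class).

-- ===== PORT A =====
-- ascii_chars_to_bytes: bytes are modelled as List Nat of byte values (Dom keeps every ord(c) < 256)
def asciiCharsToBytes (chars : String) : List Nat := chars.toList.map Char.toNat
-- ascii_bytes_to_chars
def asciiBytesToChars (bytesData : List Nat) : String := String.ofList (bytesData.map Char.ofNat)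

def deobfuscate (obfuscated : String) : String :=
  let bytesData := asciiCharsToBytes obfuscated
  -- Python raises ValueError on odd length; Pre_ excludes those inputs, "" is a placeholder
  if bytesData.length % 2 ≠ 0 then ""
  else
    -- half = length // 2 : length ≥ 0, so Python's // 2 is Nat division
    let half := bytesData.length / 2
    let xorPart := PySem.List.slice bytesData none (some (half : Int))
    let randomPart := PySem.List.slice bytesData (some (half : Int)) none
    -- bytearray(half), then for i in range(half): deobfuscated[i] = xor_part[i] ^ random_part[i]
    let deobfuscated :=
      (PySem.List.pyRange 0 (half : Int) 1).foldl
        (fun acc i =>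
          PySem.List.pySetD acc i (PySem.List.pyGetD xorPart i 0 ^^^ PySem.List.pyGetD randomPart i 0))
        (List.replicate half 0)
    asciiBytesToChars deobfuscated

-- ===== PORT B =====
-- int.from_bytes(bs, 'big')
def pvFromBytes (bs : List Nat) : Nat := bs.foldl (fun acc b => acc * 256 + b) 0
-- x.to_bytes(n, 'big') (exact for x < 256^n, which holds for the XOR of two halves)
def pvToBytes : Nat → Nat → List Nat
  | 0, _ => []
  | n + 1, x => pvToBytes n (x / 256) ++ [x % 256]

def deobfuscate_alt (obfuscated : String) : String :=
  let bytesData := asciiCharsToBytes obfuscated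
  if bytesData.length % 2 ≠ 0 then ""
  else
    let half := bytesData.length / 2
    let x := pvFromBytes (PySem.List.slice bytesData none (some (half : Int))) ^^^
             pvFromBytes (PySem.List.slice bytesData (some (half : Int)) none)
    asciiBytesToChars (pvToBytes half x)

-- ===== PRECONDITION & SPEC =====
-- Pre_ excludes odd-length strings, on which Python's deobfuscate raises ValueError.
def Pre_deobfuscate (obfuscated : String) : Prop := obfuscated.toList.length % 2 = 0
instance (obfuscated : String) : Decidable (Pre_deobfuscate obfuscated) := by
  unfold Pre_deobfuscate; infer_instance
def pvWitness_deobfuscate : String := "ab"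

def Spec_deobfuscate (obfuscated : String) (out : String) : Prop := out = deobfuscate_alt obfuscated
instance (obfuscated : String) (out : String) : Decidable (Spec_deobfuscate obfuscated out) := by unfold Spec_deobfuscate; infer_instance

-- ===== CLAIM (what is proved, stated in full; the proofs are below) =====
def Claim_equal_deobfuscate : Prop := ∀ (obfuscated : String), Dom_deobfuscate obfuscated → Pre_deobfuscate obfuscated → Spec_deobfuscate obfuscated (deobfuscate obfuscated)

-- ===== LEMMAS AND PROOFS =====

-- pvFromBytes peels the last byte
lemma pvFromBytes_append (l : List Nat) (d : Nat) :
    pvFromBytes (l ++ [d]) = pvFromBytes l * 256 + d := by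
  simp [pvFromBytes, List.foldl_append]

-- the key fact: big-endian from_bytes / XOR / to_bytes is bytewise XOR
lemma toBytes_xor_fromBytes :
    ∀ (a b : List Nat), a.length = b.length → (∀ x ∈ a, x < 256) → (∀ x ∈ b, x < 256) →
    pvToBytes a.length (pvFromBytes a ^^^ pvFromBytes b) = List.zipWith (· ^^^ ·) a b := by
  intro a
  induction a using List.reverseRecOn with
  | nil =>
    intro b hb _ _
    have : b = [] := List.eq_nil_of_length_eq_zero hb.symm
    simp [this, pvFromBytes, pvToBytes]
  | append_singleton a' d ih =>
    intro b hb ha256 hb256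
    cases b using List.reverseRecOn with
    | nil => simp at hb
    | append_singleton b' e =>
      have hlen : a'.length = b'.length := by
        simp at hb; omega
      have hd : d < 256 := ha256 d (by simp)
      have he : e < 256 := hb256 e (by simp)
      have h256 : (256 : Nat) = 2 ^ 8 := by norm_num
      have hdiv : (pvFromBytes (a' ++ [d]) ^^^ pvFromBytes (b' ++ [e])) / 256 =
          pvFromBytes a' ^^^ pvFromBytes b' := by
        rw [pvFromBytes_append, pvFromBytes_append, h256, Nat.xor_div_two_pow]
        congr 1 <;> omega
      have hmod : (pvFromBytes (a' ++ [d]) ^^^ pvFromBytes (b' ++ [e])) % 256 =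
          d % 256 ^^^ e % 256 := by
        rw [pvFromBytes_append, pvFromBytes_append, h256, Nat.xor_mod_two_pow]
        congr 1 <;> omega
      have hla : (a' ++ [d]).length = a'.length + 1 := by simp
      rw [hla, pvToBytes, hdiv, hmod,
        ih b' hlen (fun x hx => ha256 x (by simp [hx])) (fun x hx => hb256 x (by simp [hx])),
        List.zipWith_append hlen]
      rw [Nat.mod_eq_of_lt hd, Nat.mod_eq_of_lt he]
      rfl

-- a fold that sets every index of the accumulator in order is a map over the range
lemma foldl_set_range (g : Nat → Nat) :
    ∀ (n : Nat) (acc : List Nat), n ≤ acc.length →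
    (List.range n).foldl (fun a k => a.set k (g k)) acc =
      (List.range n).map g ++ acc.drop n := by
  intro n
  induction n with
  | zero => simp
  | succ n ih =>
    intro acc hacc
    have hn : n < acc.length := by omega
    have hmaplen : ((List.range n).map g).length = n := by simp
    have hdrop : acc.drop n = acc[n] :: acc.drop (n + 1) :=
      (List.getElem_cons_drop hn).symm
    rw [List.range_succ, List.foldl_append, ih acc (by omega)]
    simp only [List.foldl_cons, List.foldl_nil, List.map_append, List.map_cons, List.map_nil]
    rw [List.set_append_right _ _ (by simp), hdrop, hmaplen, Nat.sub_self, List.set_cons_zero]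
    simp

-- the mapped range of XORed lookups is zipWith XOR
lemma map_range_getD_xor (p q : List Nat) (n : Nat) (hp : p.length = n) (hq : q.length = n) :
    (List.range n).map (fun k => p.getD k 0 ^^^ q.getD k 0) = List.zipWith (· ^^^ ·) p q := by
  apply List.ext_getElem
  · simp [hp, hq]
  · intro k h1 h2
    simp only [List.getElem_map, List.getElem_range, List.getElem_zipWith]
    rw [List.getD_eq_getElem p 0 (by simp at h1; omega),
        List.getD_eq_getElem q 0 (by simp at h1; omega)]

-- ===== VERDICT (by name: the statement is the Claim_ definition above) =====
theorem deobfuscate_spec : Claim_equal_deobfuscate := by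
  intro s hdom hpre
  unfold Spec_deobfuscate deobfuscate deobfuscate_alt
  have hev : (asciiCharsToBytes s).length % 2 = 0 := by
    simpa [asciiCharsToBytes] using hpre
  set bs := asciiCharsToBytes s with hbs
  set half := bs.length / 2 with hhalf
  have h256 : ∀ x ∈ bs, x < 256 := by
    rw [hbs]
    intro x hx
    simp only [asciiCharsToBytes, List.mem_map] at hx
    obtain ⟨c, hc, rfl⟩ := hx
    unfold Dom_deobfuscate pvDomStr at hdom
    have hcdom := List.all_eq_true.mp hdom c hc
    simp only [pvDomChar, Bool.or_eq_true, Bool.and_eq_true, decide_eq_true_eq,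
      beq_iff_eq] at hcdom
    omega
  have htake : PySem.List.slice bs none (some (half : Int)) = bs.take half :=
    PySem.List.slice_to_natCast ..
  have hdrop : PySem.List.slice bs (some (half : Int)) none = bs.drop half :=
    PySem.List.slice_from_natCast ..
  have hlp : (bs.take half).length = half := by simp; omega
  have hlq : (bs.drop half).length = half := by simp; omega
  simp only [if_neg (by omega : ¬ bs.length % 2 ≠ 0)]
  rw [htake, hdrop, ← hhalf, PySem.List.pyRange_one]
  -- reduce A's loop over pyRange to a foldl over List.range with Nat indexing
  simp only [Int.sub_zero, Int.toNat_natCast, List.foldl_map, zero_add,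
    PySem.List.pySetD_natCast, PySem.List.pyGetD_natCast]
  rw [foldl_set_range _ half (List.replicate half 0) (by simp),
    List.drop_eq_nil_of_le (as := List.replicate half 0) (by simp), List.append_nil,
    map_range_getD_xor _ _ half hlp hlq]
  have hkey := toBytes_xor_fromBytes (bs.take half) (bs.drop half) (by omega)
    (fun x hx => h256 x (List.mem_of_mem_take hx))
    (fun x hx => h256 x (List.mem_of_mem_drop hx))
  rw [hlp] at hkey
  rw [hkey]
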